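-- pv_equiv track=rewrite | github.com/cybernomad-pl/fuse-npc-generator | fuse_variant.py | get_slot_type
-- ===== SOURCE A (Python) =====
-- def get_slot_type(item_name):
--     for prefix, slot in {
--         'Hat_': 'hat', 'Top_': 'top', 'Bottom_': 'bottom',
--         'Shoes_': 'shoes', 'Gloves_': 'gloves', 'Glasses_': 'glasses',
--         'Mask_': 'mask', 'Beard_': 'beard', 'Moustache_': 'moustache',
--         'Hair_': 'hair',
--     }.items():
--         if item_name.startswith(prefix):
--             return slot
--     return '?'
-- ===== SOURCE B (Python) =====
-- _HEADS = ('Hat', 'Top', 'Bottom', 'Shoes', 'Gloves', 'Glasses',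
--           'Mask', 'Beard', 'Moustache', 'Hair')
--
-- def get_slot_type(item_name):
--     head, sep, _tail = item_name.partition('_')
--     if sep and head in _HEADS:
--         return head.lower()
--     return '?'
-- ===== Notes on version B (the rewrite author's own statement) =====
-- stated objective: idiomatic
-- what changed: A scans ten underscore-terminated prefixes with startswith and returns a stored slot value; B has no value table: it partitions the name at the first underscore and, if the head is one of the ten valid heads, returns the head lowercased.
import Mathlib
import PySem

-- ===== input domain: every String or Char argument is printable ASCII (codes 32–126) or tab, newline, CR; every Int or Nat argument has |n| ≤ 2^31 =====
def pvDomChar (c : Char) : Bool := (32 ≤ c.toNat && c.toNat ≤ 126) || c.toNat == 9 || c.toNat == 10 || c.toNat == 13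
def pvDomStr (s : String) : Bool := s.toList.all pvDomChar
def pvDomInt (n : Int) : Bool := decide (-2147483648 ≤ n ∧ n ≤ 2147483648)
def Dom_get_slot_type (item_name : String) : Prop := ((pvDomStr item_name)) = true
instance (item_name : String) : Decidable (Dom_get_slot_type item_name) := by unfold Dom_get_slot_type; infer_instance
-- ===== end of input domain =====

-- B drops A's value table entirely: it partitions the name at the first underscore and, when the
-- head is one of the ten valid heads, returns the head lowercased (objective: idiomatic).

-- ===== PORT A =====
-- the dict literal A iterates over
def slotPrefixes : PySem.Dict String String :=
  PySem.Dict.ofList [("Hat_", "hat"), ("Top_", "top"), ("Bottom_", "bottom"),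
    ("Shoes_", "shoes"), ("Gloves_", "gloves"), ("Glasses_", "glasses"),
    ("Mask_", "mask"), ("Beard_", "beard"), ("Moustache_", "moustache"),
    ("Hair_", "hair")]

-- the for-loop with early return over .items()
def slotLoop (item_name : String) : List (String × String) → String
  | [] => "?"
  | (pre, slot) :: rest =>
      if PySem.Str.startswith item_name pre then slot else slotLoop item_name rest

def get_slot_type (item_name : String) : String :=
  slotLoop item_name slotPrefixes.items

-- ===== PORT B =====
def validHeads : List String :=
  ["Hat", "Top", "Bottom", "Shoes", "Gloves", "Glasses",
   "Mask", "Beard", "Moustache", "Hair"]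

-- str.partition('_') has no PySem primitive; it is ported exactly as
-- (find, then head = slice before it; sep nonempty ↔ found).
def get_slot_type_alt (item_name : String) : String :=
  let i := PySem.Str.find item_name "_"
  if i < 0 then "?"
  else
    let head := PySem.Str.slice item_name none (some i)
    if head ∈ validHeads then PySem.Str.lower head else "?"

-- ===== PRECONDITION & SPEC =====
def Spec_get_slot_type (item_name : String) (out : String) : Prop := out = get_slot_type_alt item_name
instance (item_name : String) (out : String) : Decidable (Spec_get_slot_type item_name out) := by unfold Spec_get_slot_type; infer_instance

-- ===== CLAIM (what is proved, stated in full; the proofs are below) =====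
def Claim_equal_get_slot_type : Prop := ∀ (item_name : String), Dom_get_slot_type item_name → Spec_get_slot_type item_name (get_slot_type item_name)

-- ===== LEMMAS AND PROOFS =====
theorem singleton_prefix_iff' (a : Char) (l : List Char) : [a] <+: l ↔ l.head? = some a := by
  cases l with
  | nil => simp
  | cons b t => simp [List.cons_prefix_iff]

-- startswith (X ++ ['_']) holds iff '_' occurs and the text before its first occurrence is X
theorem sw_key (cs X : List Char) (hX : '_' ∉ X) :
    PySem.Chars.startswith cs (X ++ ['_']) = true ↔
      0 ≤ PySem.Chars.find cs ['_'] ∧ cs.take (PySem.Chars.find cs ['_']).toNat = X := by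
  rw [PySem.Chars.startswith_iff]
  constructor
  · rintro ⟨t, ht⟩
    have hmem : '_' ∈ cs := by
      rw [← ht]; simp
    have h0 : 0 ≤ PySem.Chars.find cs ['_'] := by
      rw [PySem.Chars.find_nonneg_iff, List.singleton_infix_iff]; exact hmem
    obtain ⟨hpre, hmin⟩ := PySem.Chars.find_spec h0
    set n := (PySem.Chars.find cs ['_']).toNat with hn
    have hgetn : cs[n]? = some '_' := by
      rw [← List.head?_drop, ← singleton_prefix_iff']; exact hpre
    have hget : ∀ j, cs[j]? = some '_' → n ≤ j := by
      intro j hj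
      by_contra hlt
      exact hmin j (by omega) ((singleton_prefix_iff' _ _).mpr (by rw [List.head?_drop]; exact hj))
    have hcs : cs = X ++ '_' :: t := by rw [← ht]; simp
    have hXl : cs[X.length]? = some '_' := by
      rw [hcs]; simp
    have hle : n ≤ X.length := hget _ hXl
    have hne : ¬ n < X.length := by
      intro hlt
      have : cs[n]? = some X[n] := by
        rw [hcs, List.getElem?_append_left (by omega)]
        simp [hlt]
      rw [this] at hgetn
      exact hX (by rw [← Option.some_inj.mp hgetn]; exact List.getElem_mem hlt)
    have hnX : n = X.length := by omega
    refine ⟨h0, ?_⟩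
    rw [hcs, hnX, List.take_left]
  · rintro ⟨h0, htake⟩
    obtain ⟨hpre, -⟩ := PySem.Chars.find_spec h0
    obtain ⟨t, ht⟩ := hpre
    refine ⟨t, ?_⟩
    have hcs : cs = X ++ ('_' :: t) := by
      conv_lhs => rw [← List.take_append_drop (PySem.Chars.find cs ['_']).toNat cs]
      rw [htake, ← ht]
      simp
    rw [hcs]; simp

-- when '_' does not occur in the name, no prefix containing '_' can match
theorem sw_false (cs p : List Char) (hp : '_' ∈ p) (h : '_' ∉ cs) :
    PySem.Chars.startswith cs p = false := by
  rw [Bool.eq_false_iff]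
  intro hsw
  obtain ⟨t, ht⟩ := (PySem.Chars.startswith_iff cs p).mp hsw
  exact h (by rw [← ht]; exact List.mem_append_left _ hp)

-- under 0 ≤ find, each startswith test equals a key comparison against the head
theorem sw_head (item_name p key : String) (hp : p.toList = key.toList ++ ['_'])
    (hk : '_' ∉ key.toList) (h0 : 0 ≤ PySem.Chars.find item_name.toList ['_']) :
    PySem.Str.startswith item_name p
      = (key == PySem.Str.slice item_name none (some (PySem.Str.find item_name "_"))) := by
  have hfind : PySem.Str.find item_name "_" = PySem.Chars.find item_name.toList ['_'] := by
    simp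
  have hslice : (PySem.Str.slice item_name none (some (PySem.Str.find item_name "_"))).toList
      = item_name.toList.take (PySem.Chars.find item_name.toList ['_']).toNat := by
    rw [hfind]
    simp [PySem.List.slice_to item_name.toList h0]
  rw [Bool.eq_iff_iff]
  rw [beq_iff_eq]
  have hsw : PySem.Str.startswith item_name p = PySem.Chars.startswith item_name.toList p.toList := by
    simp
  rw [hsw, hp, sw_key _ _ hk]
  constructor
  · rintro ⟨-, htake⟩
    apply String.toList_inj.mp
    rw [hslice, htake]
  · intro hkey
    refine ⟨h0, ?_⟩
    rw [← hslice, ← hkey]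

-- ===== VERDICT (by name: the statement is the Claim_ definition above) =====
theorem get_slot_type_spec : Claim_equal_get_slot_type := by
  intro item_name _
  unfold Spec_get_slot_type get_slot_type get_slot_type_alt
  have hitems : slotPrefixes.items = [("Hat_", "hat"), ("Top_", "top"), ("Bottom_", "bottom"),
      ("Shoes_", "shoes"), ("Gloves_", "gloves"), ("Glasses_", "glasses"),
      ("Mask_", "mask"), ("Beard_", "beard"), ("Moustache_", "moustache"),
      ("Hair_", "hair")] := by decide
  rw [hitems]
  by_cases h0 : 0 ≤ PySem.Chars.find item_name.toList ['_']
  · rw [if_neg (by simp; omega : ¬ PySem.Str.find item_name "_" < 0)]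
    simp only [slotLoop,
      sw_head item_name "Hat_" "Hat" (by decide) (by decide) h0,
      sw_head item_name "Top_" "Top" (by decide) (by decide) h0,
      sw_head item_name "Bottom_" "Bottom" (by decide) (by decide) h0,
      sw_head item_name "Shoes_" "Shoes" (by decide) (by decide) h0,
      sw_head item_name "Gloves_" "Gloves" (by decide) (by decide) h0,
      sw_head item_name "Glasses_" "Glasses" (by decide) (by decide) h0,
      sw_head item_name "Mask_" "Mask" (by decide) (by decide) h0,
      sw_head item_name "Beard_" "Beard" (by decide) (by decide) h0,
      sw_head item_name "Moustache_" "Moustache" (by decide) (by decide) h0,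
      sw_head item_name "Hair_" "Hair" (by decide) (by decide) h0]
    generalize PySem.Str.slice item_name none (some (PySem.Str.find item_name "_")) = s
    by_cases e1 : "Hat" = s;       · subst e1; decide
    by_cases e2 : "Top" = s;       · subst e2; decide
    by_cases e3 : "Bottom" = s;    · subst e3; decide
    by_cases e4 : "Shoes" = s;     · subst e4; decide
    by_cases e5 : "Gloves" = s;    · subst e5; decide
    by_cases e6 : "Glasses" = s;   · subst e6; decide
    by_cases e7 : "Mask" = s;      · subst e7; decide
    by_cases e8 : "Beard" = s;     · subst e8; decide
    by_cases e9 : "Moustache" = s; · subst e9; decide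
    by_cases e10 : "Hair" = s;     · subst e10; decide
    have hmem : s ∉ validHeads := by
      simp only [validHeads, List.mem_cons, List.not_mem_nil, or_false]
      push Not
      exact ⟨Ne.symm e1, Ne.symm e2, Ne.symm e3, Ne.symm e4, Ne.symm e5,
        Ne.symm e6, Ne.symm e7, Ne.symm e8, Ne.symm e9, Ne.symm e10⟩
    simp only [beq_iff_eq, if_neg e1, if_neg e2, if_neg e3, if_neg e4, if_neg e5,
      if_neg e6, if_neg e7, if_neg e8, if_neg e9, if_neg e10, if_neg hmem]
  · have hno : '_' ∉ item_name.toList := by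
      rw [← List.singleton_infix_iff, ← PySem.Chars.find_nonneg_iff]
      exact h0
    rw [if_pos (by simp; omega)]
    have hsw : ∀ p : String, '_' ∈ p.toList → PySem.Str.startswith item_name p = false :=
      fun p hp => by simpa using sw_false item_name.toList p.toList hp hno
    simp only [slotLoop,
      hsw "Hat_" (by decide), hsw "Top_" (by decide), hsw "Bottom_" (by decide),
      hsw "Shoes_" (by decide), hsw "Gloves_" (by decide), hsw "Glasses_" (by decide),
      hsw "Mask_" (by decide), hsw "Beard_" (by decide), hsw "Moustache_" (by decide),
      hsw "Hair_" (by decide), Bool.false_eq_true, if_false]
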